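-- pv_equiv track=rewrite | github.com/sahilambre/Fundamentals-of-Computing | Code/Lab/lab5.py | stringBalance
-- ===== SOURCE A (Python) =====
-- def stringBalance(s):
--     i = 0
--     for element in s:
--         if ord(element) < ord('m'):
--            i = i - 1
--         else:
--             i = i + 1
--     return i
-- ===== SOURCE B (Python) =====
-- def stringBalance(s):
--     # Group characters into a frequency table, then weight each DISTINCT
--     # character once by its count: -n for chars below 'm', +n otherwise.
--     freq = {}
--     for c in s:
--         freq[c] = freq.get(c, 0) + 1
--     total = 0
--     for c, n in freq.items():
--         total += -n if ord(c) < ord('m') else n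
--     return total
-- ===== Notes on version B (the rewrite author's own statement) =====
-- stated objective: alternative
-- what changed: B builds a character-frequency dictionary in one pass and then sums a signed count once per DISTINCT character (count*(-1) below 'm', count*(+1) otherwise), instead of A's per-character +/-1 running balance; the sign test runs once per distinct character, not once per character.
import Mathlib
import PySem

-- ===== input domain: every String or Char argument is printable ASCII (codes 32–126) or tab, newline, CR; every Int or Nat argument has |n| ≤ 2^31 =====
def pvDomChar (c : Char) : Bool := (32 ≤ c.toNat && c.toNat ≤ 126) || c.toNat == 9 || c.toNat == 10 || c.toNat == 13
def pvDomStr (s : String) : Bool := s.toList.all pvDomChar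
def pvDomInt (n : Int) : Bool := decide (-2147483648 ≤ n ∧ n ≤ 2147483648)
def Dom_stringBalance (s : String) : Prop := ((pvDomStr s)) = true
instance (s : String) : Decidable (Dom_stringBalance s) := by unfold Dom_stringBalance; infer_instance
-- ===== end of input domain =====

-- B groups the characters into a frequency dictionary and sums a signed count once per distinct character, instead of A's per-character +/-1 running balance (objective: alternative).

-- ===== PORT A =====
-- literal port of A: running balance, i := i-1 if ord c < ord 'm' else i+1
def stringBalance (s : String) : Int :=
  s.toList.foldl (fun i element => if element.toNat < 'm'.toNat then i - 1 else i + 1) 0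

-- ===== PORT B =====
-- literal port of B: build freq[c] = freq.get(c,0)+1 over the string, then
-- total += -n if ord(c) < ord('m') else n over freq.items()
def stringBalance_alt (s : String) : Int :=
  let freq : PySem.Dict Char Int :=
    s.toList.foldl (fun d c => d.insert c (d.getD c 0 + 1)) PySem.Dict.empty
  freq.items.foldl (fun total p => total + (if p.1.toNat < 'm'.toNat then -p.2 else p.2)) 0

-- ===== PRECONDITION & SPEC =====
def Spec_stringBalance (s : String) (out : Int) : Prop := out = stringBalance_alt s
instance (s : String) (out : Int) : Decidable (Spec_stringBalance s out) := by unfold Spec_stringBalance; infer_instance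

-- ===== CLAIM (what is proved, stated in full; the proofs are below) =====
def Claim_equal_stringBalance : Prop := ∀ (s : String), Dom_stringBalance s → Spec_stringBalance s (stringBalance s)

-- ===== LEMMAS AND PROOFS =====

-- A's running balance in closed form: length minus twice the below-'m' count.
theorem stringBalance_foldl (l : List Char) (i : Int) :
    l.foldl (fun i element => if element.toNat < 'm'.toNat then i - 1 else i + 1) i
      = i + (l.length : Int) - 2 * (l.countP (fun c => c.toNat < 'm'.toNat) : Int) := by
  induction l generalizing i with
  | nil => simp
  | cons c t ih =>
    simp only [List.foldl_cons, List.countP_cons]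
    rw [ih]
    by_cases h : c.toNat < 'm'.toNat
    · simp only [if_pos h, decide_eq_true h, if_true, List.length_cons]; push_cast; ring
    · simp only [if_neg h, decide_eq_false h, Bool.false_eq_true, if_false, List.length_cons]
      push_cast; ring

-- the distinct-character list of B's dict is a permutation of Mathlib's dedup
theorem perm_set_dedup (l : List Char) : (PySem.Set.ofList l).Perm l.dedup := by
  refine (List.perm_ext_iff_of_nodup (PySem.Set.nodup_ofList l) l.nodup_dedup).2 ?_
  intro a
  simp [PySem.Set.mem_ofList]

-- B's per-distinct-character signed-count sum in the same closed form.
theorem stringBalance_alt_form (l : List Char) :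
    (let freq : PySem.Dict Char Int :=
      l.foldl (fun d c => d.insert c (d.getD c 0 + 1)) PySem.Dict.empty
     freq.items.foldl (fun total p => total + (if p.1.toNat < 'm'.toNat then -p.2 else p.2)) 0)
      = (l.length : Int) - 2 * (l.countP (fun c => c.toNat < 'm'.toNat) : Int) := by
  simp only [PySem.Dict.foldl_insert_getD_add_one_eq_counter, PySem.Dict.items_counter,
    List.foldl_map]
  rw [PySem.List.foldl_add (g := fun k => if k.toNat < 'm'.toNat then -((l.count k : Int)) else (l.count k : Int))]
  have hsplit : ∀ (S : List Char),
      (S.map (fun k => if k.toNat < 'm'.toNat then -((l.count k : Int)) else (l.count k : Int))).sum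
        = (S.map (fun k => (l.count k : Int))).sum
          - 2 * (((S.filter (fun k => k.toNat < 'm'.toNat)).map (fun k => (l.count k : Int))).sum) := by
    intro S
    induction S with
    | nil => simp
    | cons a t ih =>
      by_cases h : a.toNat < 'm'.toNat
      · simp only [List.map_cons, List.sum_cons, List.filter_cons, decide_eq_true h, if_pos h,
          if_true, ih]
        ring
      · simp only [List.map_cons, List.sum_cons, List.filter_cons, decide_eq_false h, if_neg h,
          Bool.false_eq_true, if_false, ih]
        ring
  rw [hsplit]
  have hperm := perm_set_dedup l
  have h1 : (((PySem.Set.ofList l).map (fun k => (l.count k : Int))).sum)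
      = ((l.dedup.map (fun k => (l.count k : Int))).sum) :=
    ((hperm.map _).sum_eq)
  have h2 : (((PySem.Set.ofList l).filter (fun k => k.toNat < 'm'.toNat)).map (fun k => (l.count k : Int))).sum
      = ((l.dedup.filter (fun k => k.toNat < 'm'.toNat)).map (fun k => (l.count k : Int))).sum :=
    (((hperm.filter _).map _).sum_eq)
  rw [h1, h2]
  have hcast : ∀ (S : List Char) (f : Char → Nat),
      (S.map (fun k => (f k : Int))).sum = ((S.map f).sum : Int) := by
    intro S f
    induction S with
    | nil => simp
    | cons a t ih => simp [ih]
  have h3 : (l.dedup.map (fun k => (l.count k : Int))).sum = (l.length : Int) := by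
    rw [hcast, List.sum_map_count_dedup_eq_length l]
  have h4 : ((l.dedup.filter (fun k => k.toNat < 'm'.toNat)).map (fun k => (l.count k : Int))).sum
      = (l.countP (fun c => c.toNat < 'm'.toNat) : Int) := by
    rw [hcast, List.sum_map_count_dedup_filter_eq_countP (fun c => decide (c.toNat < 'm'.toNat)) l]
  rw [h3, h4]
  ring

-- ===== VERDICT (by name: the statement is the Claim_ definition above) =====
theorem stringBalance_spec : Claim_equal_stringBalance := by
  intro s _
  unfold Spec_stringBalance stringBalance stringBalance_alt
  rw [stringBalance_foldl, stringBalance_alt_form s.toList]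
  ring
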